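-- pv_equiv track=rewrite | github.com/ConClude7/SheepTool | calibrate.py | _get_map_logical_bounds
-- ===== SOURCE A (Python) =====
-- DEFAULT_WIDTH_NUM = 8
--
-- DEFAULT_HEIGHT_NUM = 10
--
-- def _iter_map_cards(map_data: dict) -> list[dict]:
--     level_data = map_data.get("levelData") or {}
--     cards: list[dict] = []
--     for key in sorted(level_data.keys(), key=int):
--         cards.extend(level_data[key])
--     return cards
--
-- def _get_map_logical_bounds(map_data: dict) -> tuple[int, int, int, int]:
--     cards = _iter_map_cards(map_data)
--     if not cards:
--         return 0, 0, DEFAULT_WIDTH_NUM * 8, DEFAULT_HEIGHT_NUM * 8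
--
--     min_rol = min(int(card.get("rolNum", 0)) for card in cards)
--     min_row = min(int(card.get("rowNum", 0)) for card in cards)
--     max_rol = max(int(card.get("rolNum", 0)) for card in cards)
--     max_row = max(int(card.get("rowNum", 0)) for card in cards)
--     return min_rol, min_row, max_rol + 8, max_row + 8
-- ===== SOURCE B (Python) =====
-- DEFAULT_WIDTH_NUM = 8
--
-- DEFAULT_HEIGHT_NUM = 10
--
-- def _get_map_logical_bounds(map_data: dict) -> tuple[int, int, int, int]:
--     # One fused pass: no key sorting (order is irrelevant for min/max) and all
--     # four bounds maintained in a single traversal of the cards.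
--     level_data = map_data.get("levelData") or {}
--     bounds = None
--     for group in level_data.values():
--         for card in group:
--             rol = int(card.get("rolNum", 0))
--             row = int(card.get("rowNum", 0))
--             if bounds is None:
--                 bounds = (rol, row, rol, row)
--             else:
--                 a, b, c, d = bounds
--                 bounds = (min(a, rol), min(b, row), max(c, rol), max(d, row))
--     if bounds is None:
--         return 0, 0, DEFAULT_WIDTH_NUM * 8, DEFAULT_HEIGHT_NUM * 8
--     return bounds[0], bounds[1], bounds[2] + 8, bounds[3] + 8
-- ===== Notes on version B (the rewrite author's own statement) =====
-- stated objective: alternative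
-- what changed: B drops the int-keyed sort of levelData keys entirely (order cannot affect min/max) and replaces A's collect-then-four-scans with a single fused pass over the cards that maintains all four running bounds at once.
import Mathlib
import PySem

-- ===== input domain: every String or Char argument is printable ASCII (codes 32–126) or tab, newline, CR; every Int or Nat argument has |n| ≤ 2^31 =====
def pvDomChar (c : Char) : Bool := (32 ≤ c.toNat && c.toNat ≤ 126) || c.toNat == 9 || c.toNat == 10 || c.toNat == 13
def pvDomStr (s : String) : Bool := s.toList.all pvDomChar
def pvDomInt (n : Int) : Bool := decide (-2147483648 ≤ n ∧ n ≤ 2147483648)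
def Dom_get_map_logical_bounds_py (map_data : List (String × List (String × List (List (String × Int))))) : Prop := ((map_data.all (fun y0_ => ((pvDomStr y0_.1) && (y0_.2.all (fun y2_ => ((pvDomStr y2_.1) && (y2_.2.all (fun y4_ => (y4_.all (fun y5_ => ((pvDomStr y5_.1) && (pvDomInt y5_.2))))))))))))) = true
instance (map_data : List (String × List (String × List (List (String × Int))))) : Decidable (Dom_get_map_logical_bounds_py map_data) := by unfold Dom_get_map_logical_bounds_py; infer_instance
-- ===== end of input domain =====

-- ===== PORT A =====
-- B replaces A's key-sort + collect + four min/max scans by one fused pass over the cards; return value only.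
-- shared parameter decoding: the levelData sub-dict of map_data (Python dict -> PySem.Dict)
def pvLevelDict (map_data : List (String × List (String × List (List (String × Int))))) : PySem.Dict String (List (List (String × Int))) :=
  PySem.Dict.ofList ((PySem.Dict.ofList map_data).getD "levelData" [])

-- int(card.get(k, 0))  (values are already ints, so int() is the identity)
def pvCardNum (card : List (String × Int)) (k : String) : Int :=
  (PySem.Dict.ofList card).getD k 0

-- _iter_map_cards: sorted(level_data.keys(), key=int) then extend; the sort key int(key)
-- raises on unparsable keys in Python — exactly the inputs Pre_ excludes (getD 0 there).
def iter_map_cards_py (map_data : List (String × List (String × List (List (String × Int))))) : List (List (String × Int)) :=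
  let level_data := pvLevelDict map_data
  let ks := PySem.List.sorted level_data.keys (fun k => (PySem.Int.ofStr? k).getD 0) false
  ks.foldl (fun acc k => acc ++ level_data.getD k []) []

def get_map_logical_bounds_py (map_data : List (String × List (String × List (List (String × Int))))) : Int × Int × Int × Int :=
  let cards := iter_map_cards_py map_data
  if cards = [] then (0, 0, 8 * 8, 10 * 8)
  else
    let min_rol := (PySem.List.min? (cards.map (fun c => pvCardNum c "rolNum")) (fun x => x)).getD 0
    let min_row := (PySem.List.min? (cards.map (fun c => pvCardNum c "rowNum")) (fun x => x)).getD 0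
    let max_rol := (PySem.List.max? (cards.map (fun c => pvCardNum c "rolNum")) (fun x => x)).getD 0
    let max_row := (PySem.List.max? (cards.map (fun c => pvCardNum c "rowNum")) (fun x => x)).getD 0
    (min_rol, min_row, max_rol + 8, max_row + 8)

-- ===== PORT B =====
-- one card updates the running (min_rol, min_row, max_rol, max_row) state
def pvBoundsStep (st : Option (Int × Int × Int × Int)) (card : List (String × Int)) : Option (Int × Int × Int × Int) :=
  let rol := pvCardNum card "rolNum"
  let row := pvCardNum card "rowNum"
  match st with
  | none => some (rol, row, rol, row)
  | some (a, b, c, d) => some (min a rol, min b row, max c rol, max d row)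

def get_map_logical_bounds_py_alt (map_data : List (String × List (String × List (List (String × Int))))) : Int × Int × Int × Int :=
  let level_data := pvLevelDict map_data
  let st := level_data.values.foldl (fun st group => group.foldl pvBoundsStep st) none
  match st with
  | none => (0, 0, 8 * 8, 10 * 8)
  | some (a, b, c, d) => (a, b, c + 8, d + 8)

-- ===== PRECONDITION & SPEC =====
-- Pre_ excludes exactly the inputs on which Python A raises ValueError: a levelData key that int() cannot parse.
def Pre_get_map_logical_bounds_py (map_data : List (String × List (String × List (List (String × Int))))) : Prop :=
  ∀ p ∈ (PySem.Dict.ofList map_data).getD "levelData" [], (PySem.Int.ofStr? p.1).isSome = true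
instance (map_data : List (String × List (String × List (List (String × Int))))) : Decidable (Pre_get_map_logical_bounds_py map_data) := by unfold Pre_get_map_logical_bounds_py; infer_instance

def pvWitness_get_map_logical_bounds_py : (List (String × List (String × List (List (String × Int))))) :=
  [("levelData", [("1", [[("rolNum", 2), ("rowNum", 3)]])])]

def Spec_get_map_logical_bounds_py (map_data : List (String × List (String × List (List (String × Int))))) (out : Int × Int × Int × Int) : Prop := out = get_map_logical_bounds_py_alt map_data
instance (map_data : List (String × List (String × List (List (String × Int))))) (out : Int × Int × Int × Int) : Decidable (Spec_get_map_logical_bounds_py map_data out) := by unfold Spec_get_map_logical_bounds_py; infer_instance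

-- ===== CLAIM (what is proved, stated in full; the proofs are below) =====
def Claim_equal_get_map_logical_bounds_py : Prop := ∀ (map_data : List (String × List (String × List (List (String × Int))))), Dom_get_map_logical_bounds_py map_data → Pre_get_map_logical_bounds_py map_data → Spec_get_map_logical_bounds_py map_data (get_map_logical_bounds_py map_data)

-- ===== LEMMAS AND PROOFS =====

-- updating with two cards commutes (min/max are commutative-associative componentwise)
theorem pvBoundsStep_comm (st : Option (Int × Int × Int × Int)) (c1 c2 : List (String × Int)) :
    pvBoundsStep (pvBoundsStep st c1) c2 = pvBoundsStep (pvBoundsStep st c2) c1 := by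
  rcases st with _ | ⟨a, b, c, d⟩ <;>
    simp only [pvBoundsStep, Option.some.injEq, Prod.mk.injEq, min_def, max_def] <;>
    refine ⟨?_, ?_, ?_, ?_⟩ <;> split_ifs <;> omega

-- B's nested fold is the flat fold over the concatenation of the groups
theorem foldl_groups (L : List (List (List (String × Int)))) (st : Option (Int × Int × Int × Int)) :
    L.foldl (fun st group => group.foldl pvBoundsStep st) st = (L.flatMap id).foldl pvBoundsStep st := by
  induction L generalizing st with
  | nil => rfl
  | cons g t ih => simp [List.flatMap_cons, List.foldl_append, ih]

-- the fold from a some-state computes the four componentwise folds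
theorem bounds_foldl_some (L : List (List (String × Int))) (a b c d : Int) :
    L.foldl pvBoundsStep (some (a, b, c, d)) =
      some (L.foldl (fun x g => min x (pvCardNum g "rolNum")) a,
            L.foldl (fun x g => min x (pvCardNum g "rowNum")) b,
            L.foldl (fun x g => max x (pvCardNum g "rolNum")) c,
            L.foldl (fun x g => max x (pvCardNum g "rowNum")) d) := by
  induction L generalizing a b c d with
  | nil => rfl
  | cons g t ih => simp [List.foldl_cons, pvBoundsStep, ih]

-- B's finishing step, as a function of the card list
def pvBoundsOf (L : List (List (String × Int))) : Int × Int × Int × Int :=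
  match L.foldl pvBoundsStep none with
  | none => (0, 0, 8 * 8, 10 * 8)
  | some (a, b, c, d) => (a, b, c + 8, d + 8)

-- pvBoundsOf is invariant under permutation of the cards
theorem pvBoundsOf_perm (L L' : List (List (String × Int))) (h : L.Perm L') :
    pvBoundsOf L = pvBoundsOf L' := by
  unfold pvBoundsOf
  rw [h.foldl_eq' (fun x _ y _ b => pvBoundsStep_comm b x y)]

-- A's four-scan computation on a card list equals pvBoundsOf of that list
theorem a_scans_eq_boundsOf (L : List (List (String × Int))) :
    (if L = [] then ((0 : Int), (0 : Int), (8 * 8 : Int), (10 * 8 : Int))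
     else
       ((PySem.List.min? (L.map (fun c => pvCardNum c "rolNum")) (fun x => x)).getD 0,
        (PySem.List.min? (L.map (fun c => pvCardNum c "rowNum")) (fun x => x)).getD 0,
        (PySem.List.max? (L.map (fun c => pvCardNum c "rolNum")) (fun x => x)).getD 0 + 8,
        (PySem.List.max? (L.map (fun c => pvCardNum c "rowNum")) (fun x => x)).getD 0 + 8)) =
    pvBoundsOf L := by
  rcases L with _ | ⟨c0, t⟩
  · rfl
  · simp only [pvBoundsOf, List.foldl_cons, pvBoundsStep, List.map_cons,
      PySem.List.min?_id_cons, PySem.List.max?_id_cons, bounds_foldl_some,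
      List.foldl_map, Option.getD_some, if_neg (List.cons_ne_nil c0 t)]

-- ===== VERDICT (by name: the statement is the Claim_ definition above) =====
theorem get_map_logical_bounds_py_spec : Claim_equal_get_map_logical_bounds_py := by
  intro map_data _ _
  unfold Spec_get_map_logical_bounds_py
  simp only [get_map_logical_bounds_py, get_map_logical_bounds_py_alt, iter_map_cards_py]
  rw [PySem.List.foldl_append_eq_flatMap, List.nil_append, a_scans_eq_boundsOf, foldl_groups]
  show pvBoundsOf _ = pvBoundsOf _
  have hnd : (pvLevelDict map_data).keys.Nodup := PySem.Dict.nodup_keys_ofList _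
  apply pvBoundsOf_perm
  have hB : (pvLevelDict map_data).values.flatMap id =
      (pvLevelDict map_data).keys.flatMap (fun k => (pvLevelDict map_data).getD k []) := by
    rw [PySem.Dict.values_eq_map_keys _ hnd [], List.flatMap_map]
    rfl
  rw [hB]
  exact (PySem.List.sorted_perm _ _ _).flatMap_right _
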